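-- pv_equiv track=rewrite | github.com/swathiravi2911/Problems_Solving | Intermediate_Problems/Arrays_Carry_Forward/specialSequenceAG.py | anotherWay
-- ===== SOURCE A (Python) =====
-- def anotherWay(A):
--     N = len(A)
--     count_g = 0
--     answer = 0
--     for i in range(N-1, -1, -1):
--         if A[i] == 'G':
--             count_g += 1
--         elif A[i] == 'A':
--             answer += count_g
--     return answer
-- ===== SOURCE B (Python) =====
-- def anotherWay(A):
--     # build prefix table: pref[i] = number of 'A' strictly left of position i
--     pref = []
--     c = 0
--     for s in A:
--         pref.append(c)
--         if s == 'A':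
--             c += 1
--     # second pass: each 'G' contributes the A-count to its left
--     ans = 0
--     for c0, s in zip(pref, A):
--         if s == 'G':
--             ans += c0
--     return ans
-- ===== Notes on version B (the rewrite author's own statement) =====
-- stated objective: alternative
-- what changed: Replaces the single backward pass (running count of G's, indexed loop over range(N-1,-1,-1)) with a forward build-a-prefix-table-of-A-counts pass followed by a zip pass summing the table at each 'G'.
import Mathlib
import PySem

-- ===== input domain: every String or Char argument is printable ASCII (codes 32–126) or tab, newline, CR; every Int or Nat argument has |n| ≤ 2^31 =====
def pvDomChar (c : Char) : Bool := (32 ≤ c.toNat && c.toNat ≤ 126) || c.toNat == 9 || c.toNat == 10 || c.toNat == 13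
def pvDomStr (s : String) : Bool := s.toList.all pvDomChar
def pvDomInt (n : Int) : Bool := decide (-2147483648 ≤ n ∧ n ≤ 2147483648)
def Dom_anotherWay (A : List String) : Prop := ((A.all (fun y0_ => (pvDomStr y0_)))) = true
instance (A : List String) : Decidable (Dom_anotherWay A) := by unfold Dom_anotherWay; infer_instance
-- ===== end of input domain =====

-- B replaces A's single backward indexed pass by a forward prefix-table build plus a zip pass; alternative decomposition, same cost.

-- ===== PORT A =====
-- backward loop over range(N-1, -1, -1); A[i] is always in range, pyGetD's default is never used
def anotherWay (A : List String) : Int :=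
  let N : Nat := A.length
  let st := (PySem.List.pyRange ((N : Int) - 1) (-1) (-1)).foldl
    (fun (st : Int × Int) i =>
      let s := PySem.List.pyGetD A i ""
      if s = "G" then (st.1 + 1, st.2)
      else if s = "A" then (st.1, st.2 + st.1)
      else st) (0, 0)
  st.2

-- ===== PORT B =====
-- first pass: build pref (A-counts strictly left of each position)
def anotherWay_alt (A : List String) : Int :=
  let pc := A.foldl
    (fun (st : List Int × Int) s =>
      (st.1 ++ [st.2], if s = "A" then st.2 + 1 else st.2)) ([], 0)
  -- second pass: sum pref entry at each 'G'
  (pc.1.zip A).foldl (fun (ans : Int) p => if p.2 = "G" then ans + p.1 else ans) 0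

-- ===== PRECONDITION & SPEC =====
def Spec_anotherWay (A : List String) (out : Int) : Prop := out = anotherWay_alt A
instance (A : List String) (out : Int) : Decidable (Spec_anotherWay A out) := by unfold Spec_anotherWay; infer_instance

-- ===== CLAIM (what is proved, stated in full; the proofs are below) =====
def Claim_equal_anotherWay : Prop := ∀ (A : List String), Dom_anotherWay A → Spec_anotherWay A (anotherWay A)

-- ===== LEMMAS AND PROOFS =====

-- A's loop body as a function of the element (right-to-left accumulation)
def pvStep (s : String) (st : Int × Int) : Int × Int :=
  if s = "G" then (st.1 + 1, st.2)
  else if s = "A" then (st.1, st.2 + st.1)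
  else st

-- the prefix table B builds, as a direct recursion
def pvPref (c : Int) : List String → List Int
  | [] => []
  | s :: t => c :: pvPref (if s = "A" then c + 1 else c) t

-- B's answer as a direct recursion carrying the running A-count
def pvG (c : Int) : List String → Int
  | [] => 0
  | s :: t => (if s = "G" then c else 0) + pvG (if s = "A" then c + 1 else c) t

lemma pvPref_spec (A : List String) : ∀ (p : List Int) (c : Int),
    (A.foldl (fun (st : List Int × Int) s =>
      (st.1 ++ [st.2], if s = "A" then st.2 + 1 else st.2)) (p, c)).1 = p ++ pvPref c A := by
  induction A with
  | nil => intro p c; simp [pvPref]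
  | cons s t ih =>
      intro p c
      simp only [List.foldl_cons, pvPref]
      rw [ih]
      simp

lemma pvZip_spec (A : List String) : ∀ (c ans : Int),
    ((pvPref c A).zip A).foldl (fun (ans : Int) p => if p.2 = "G" then ans + p.1 else ans) ans
      = ans + pvG c A := by
  induction A with
  | nil => intro c ans; simp [pvPref, pvG]
  | cons s t ih =>
      intro c ans
      simp only [pvPref, List.zip_cons_cons, List.foldl_cons, pvG]
      rw [ih]
      split_ifs <;> ring

lemma anotherWay_alt_eq_pvG (A : List String) : anotherWay_alt A = pvG 0 A := by
  simp only [anotherWay_alt]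
  rw [pvPref_spec A [] 0]
  simpa using pvZip_spec A 0 0

lemma pvFoldA (A : List String) : ∀ (n : Nat), n ≤ A.length → ∀ (st : Int × Int),
    (PySem.List.pyRange ((n : Int) - 1) (-1) (-1)).foldl
      (fun (st : Int × Int) i =>
        let s := PySem.List.pyGetD A i ""
        if s = "G" then (st.1 + 1, st.2)
        else if s = "A" then (st.1, st.2 + st.1)
        else st) st
      = (A.take n).foldr pvStep st := by
  intro n
  induction n with
  | zero =>
      intro _ st
      rw [PySem.List.pyRange_neg_one_eq_nil (by norm_num)]
      simp
  | succ n ih =>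
      intro hn st
      have hlt : n < A.length := by omega
      rw [show ((n + 1 : Nat) : Int) - 1 = (n : Int) by push_cast; ring]
      rw [PySem.List.pyRange_neg_one_cons (by omega)]
      simp only [List.foldl_cons]
      rw [ih (by omega)]
      have hget : PySem.List.pyGetD A ((n : Nat) : Int) "" = A[n] := by
        rw [PySem.List.pyGetD_natCast]
        exact List.getD_eq_getElem A "" hlt
      have htake : A.take (n + 1) = A.take n ++ [A[n]] := by
        rw [List.take_add_one, List.getElem?_eq_getElem hlt]
        rfl
      rw [htake, List.foldr_append]
      simp only [List.foldr_cons, List.foldr_nil, hget, pvStep]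

lemma anotherWay_eq_foldr (A : List String) : anotherWay A = (A.foldr pvStep (0, 0)).2 := by
  simp only [anotherWay]
  rw [pvFoldA A A.length (le_refl _) (0, 0), List.take_length]

-- B's running-count recursion agrees with A's right-to-left accumulation
lemma pvG_eq (A : List String) : ∀ (c : Int),
    pvG c A = (A.foldr pvStep (0, 0)).2 + c * (A.foldr pvStep (0, 0)).1 := by
  induction A with
  | nil => intro c; simp [pvG]
  | cons s t ih =>
      intro c
      simp only [pvG, List.foldr_cons, pvStep]
      rw [ih]
      split_ifs with h1 h2 <;> try ring
      all_goals (rw [h1] at h2; exact absurd h2 (by decide))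

-- ===== VERDICT (by name: the statement is the Claim_ definition above) =====
theorem anotherWay_spec : Claim_equal_anotherWay := by
  intro A _
  show anotherWay A = anotherWay_alt A
  rw [anotherWay_eq_foldr, anotherWay_alt_eq_pvG, pvG_eq A 0]
  ring
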